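-- pv_equiv track=rewrite | github.com/KeithDimech1/Thermo-App | scripts/break-terminology-docs.py | extract_metadata_and_toc
-- ===== SOURCE A (Python) =====
-- from typing import List, Tuple
--
-- def extract_metadata_and_toc(lines: List[str]) -> Tuple[List[str], int]:
--     """
--     Extract front matter (title, metadata) and TOC.
--     Returns (metadata_lines, end_index).
--     """
--     metadata_lines = []
--     i = 0
--
--     # Find the end of TOC (look for the separator after TOC or first main section)
--     in_toc = False
--     for idx, line in enumerate(lines):
--         if line.strip() == "## Table of Contents":
--             in_toc = True
--             metadata_lines.append(line)
--         elif in_toc and (line.startswith("---") or (line.startswith("## ") and "Table of Contents" not in line)):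
--             # End of TOC found
--             if line.startswith("---"):
--                 metadata_lines.append(line)
--                 return metadata_lines, idx + 1
--             else:
--                 return metadata_lines, idx
--         elif not in_toc or in_toc:
--             metadata_lines.append(line)
--
--     return metadata_lines, 0
-- ===== SOURCE B (Python) =====
-- from typing import List, Tuple
--
-- def extract_metadata_and_toc(lines: List[str]) -> Tuple[List[str], int]:
--     """
--     Extract front matter (title, metadata) and TOC.
--     Returns (metadata_lines, end_index).
--     """
--     header_idx = next((i for i, line in enumerate(lines)
--                        if line.strip() == "## Table of Contents"), None)
--     if header_idx is None:
--         return list(lines), 0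
--     for idx in range(header_idx + 1, len(lines)):
--         line = lines[idx]
--         if line.startswith("---"):
--             return lines[:idx + 1], idx + 1
--         if line.startswith("## ") and "Table of Contents" not in line:
--             return lines[:idx], idx
--     return list(lines), 0
-- ===== Notes on version B (the rewrite author's own statement) =====
-- stated objective: simpler
-- what changed: A's single pass with an in_toc flag and an accumulator that appends every line is replaced by two plain scans - find the index of the '## Table of Contents' header, then find the first terminator after it - returning slices of the input instead of an accumulated copy.
import Mathlib
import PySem

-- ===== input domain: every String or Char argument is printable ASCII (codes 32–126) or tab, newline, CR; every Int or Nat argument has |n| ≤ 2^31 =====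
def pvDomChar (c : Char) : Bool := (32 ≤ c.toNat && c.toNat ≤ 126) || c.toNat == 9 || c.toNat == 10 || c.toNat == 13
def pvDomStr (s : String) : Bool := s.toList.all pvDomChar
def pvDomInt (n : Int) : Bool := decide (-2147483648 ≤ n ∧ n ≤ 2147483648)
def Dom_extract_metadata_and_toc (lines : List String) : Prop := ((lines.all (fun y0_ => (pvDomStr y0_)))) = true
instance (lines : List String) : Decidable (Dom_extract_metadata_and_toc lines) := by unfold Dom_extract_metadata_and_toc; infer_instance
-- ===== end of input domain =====

-- B replaces A's single accumulating flag-driven loop by two index scans (find the TOC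
-- header, then find its terminator) and returns slices of the input; objective: simpler.

-- ===== PORT A =====
-- the for-loop of A: state (idx, metadata_lines, in_toc), one step per line
def pvALoop : List String → Int → List String → Bool → List String × Int
  | [], _, acc, _ => (acc, 0)
  | line :: rest, idx, acc, in_toc =>
    if PySem.Str.strip line == "## Table of Contents" then
      pvALoop rest (idx + 1) (acc ++ [line]) true
    else if in_toc && (PySem.Str.startswith line "---" ||
        (PySem.Str.startswith line "## " && !(PySem.Str.isIn "Table of Contents" line))) then
      if PySem.Str.startswith line "---" then (acc ++ [line], idx + 1) else (acc, idx)
    else  -- 'elif not in_toc or in_toc' is always taken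
      pvALoop rest (idx + 1) (acc ++ [line]) in_toc

def extract_metadata_and_toc (lines : List String) : List String × Int :=
  pvALoop lines 0 [] false

-- ===== PORT B =====
-- B's second loop: 'for idx in range(header_idx+1, len(lines))', scanning the suffix;
-- 'lines[:k]' for the nonnegative k used here is 'lines.take k' (PySem.List.slice_to_natCast)
def pvBScan (lines : List String) : List String → Nat → List String × Int
  | [], _ => (lines, 0)
  | line :: rest, idx =>
    if PySem.Str.startswith line "---" then (lines.take (idx + 1), (idx : Int) + 1)
    else if PySem.Str.startswith line "## " && !(PySem.Str.isIn "Table of Contents" line) then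
      (lines.take idx, (idx : Int))
    else pvBScan lines rest (idx + 1)

def extract_metadata_and_toc_alt (lines : List String) : List String × Int :=
  match lines.findIdx? (fun line => PySem.Str.strip line == "## Table of Contents") with
  | none => (lines, 0)
  | some h => pvBScan lines (lines.drop (h + 1)) (h + 1)

-- ===== PRECONDITION & SPEC =====
def Spec_extract_metadata_and_toc (lines : List String) (out : List String × Int) : Prop := out = extract_metadata_and_toc_alt lines
instance (lines : List String) (out : List String × Int) : Decidable (Spec_extract_metadata_and_toc lines out) := by unfold Spec_extract_metadata_and_toc; infer_instance

-- ===== CLAIM (what is proved, stated in full; the proofs are below) =====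
def Claim_equal_extract_metadata_and_toc : Prop := ∀ (lines : List String), Dom_extract_metadata_and_toc lines → Spec_extract_metadata_and_toc lines (extract_metadata_and_toc lines)

-- ===== LEMMAS AND PROOFS =====

-- strip() is rstrip∘lstrip; rstrip is a prefix of its argument
lemma pv_rstrip_prefix (cs : List Char) : PySem.Chars.rstrip cs <+: cs := by
  have h := List.dropWhile_suffix (l := cs.reverse) (p := PySem.Chars.isspace)
  have h2 := List.reverse_prefix.mpr h
  simpa [PySem.Chars.rstrip] using h2

-- strip() of a line is an infix of the line
lemma pv_strip_infix (cs : List Char) : PySem.Chars.strip cs <:+: cs := by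
  rw [PySem.Chars.strip]
  exact (pv_rstrip_prefix _).isInfix.trans (List.dropWhile_suffix _).isInfix

-- a line whose strip() is the TOC header starts with whitespace or '#', never "---"
lemma header_not_dashes (line : String)
    (h : PySem.Str.strip line = "## Table of Contents") :
    PySem.Str.startswith line "---" = false := by
  have h' : PySem.Chars.strip line.toList = "## Table of Contents".toList := by
    rw [← PySem.Str.toList_strip, h]
  rw [PySem.Str.startswith_eq]
  by_contra hc
  rw [Bool.not_eq_false, PySem.Chars.startswith_iff] at hc
  obtain ⟨t, ht⟩ := hc
  have hl : PySem.Chars.lstrip line.toList = line.toList := by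
    rw [PySem.Chars.lstrip, ← ht, show "---".toList = ['-', '-', '-'] from rfl]
    simp [show PySem.Chars.isspace '-' = false from by decide]
  have hp : PySem.Chars.strip line.toList <+: line.toList := by
    rw [PySem.Chars.strip, hl]; exact pv_rstrip_prefix _
  rw [h', ← ht] at hp
  obtain ⟨u, hu⟩ := hp
  simp at hu

-- a line whose strip() is the TOC header contains "Table of Contents"
lemma header_contains_toc (line : String)
    (h : PySem.Str.strip line = "## Table of Contents") :
    PySem.Str.isIn "Table of Contents" line = true := by
  have h' : PySem.Chars.strip line.toList = "## Table of Contents".toList := by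
    rw [← PySem.Str.toList_strip, h]
  rw [PySem.Str.isIn_eq, PySem.Chars.isIn_iff_infix]
  have h1 : "Table of Contents".toList <:+: "## Table of Contents".toList := by decide
  exact h1.trans (h' ▸ pv_strip_infix line.toList)

-- phase 2 (after the header): A's flagged loop equals B's terminator scan
lemma phase2 (rest : List String) : ∀ (pref : List String),
    pvALoop rest (pref.length : Int) pref true = pvBScan (pref ++ rest) rest pref.length := by
  induction rest with
  | nil => intro pref; simp [pvALoop, pvBScan]
  | cons line rest' ih =>
    intro pref
    have ih' := ih (pref ++ [line])
    simp only [List.length_append, List.length_cons, List.length_nil, Nat.zero_add,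
      List.append_assoc, List.singleton_append, Nat.cast_add, Nat.cast_one] at ih'
    by_cases hH : PySem.Str.strip line = "## Table of Contents"
    · have hD := header_not_dashes line hH
      have hT := header_contains_toc line hH
      simp at hD hT
      simp [pvALoop, pvBScan, hH, hD, hT, ih']
    · have hTake1 : (pref ++ line :: rest').take (pref.length + 1) = pref ++ [line] := by
        rw [List.take_append]; simp
      have hTake0 : (pref ++ line :: rest').take pref.length = pref := by
        rw [List.take_append]; simp
      simp [pvALoop, pvBScan, hH, ih', hTake1, hTake0]
      split_ifs <;> simp_all

-- phase 1: A's loop equals "find the header, then phase 2; else copy everything"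
lemma phase1 (rest : List String) : ∀ (pref : List String),
    pvALoop rest (pref.length : Int) pref false =
      match rest.findIdx? (fun line => PySem.Str.strip line == "## Table of Contents") with
      | none => (pref ++ rest, 0)
      | some k => pvBScan (pref ++ rest) (rest.drop (k + 1)) (pref.length + (k + 1)) := by
  induction rest with
  | nil => intro pref; simp [pvALoop]
  | cons line rest' ih =>
    intro pref
    by_cases hH : PySem.Str.strip line = "## Table of Contents"
    · have h2 := phase2 rest' (pref ++ [line])
      simp only [List.length_append, List.length_cons, List.length_nil, Nat.zero_add,
        List.append_assoc, List.singleton_append, Nat.cast_add, Nat.cast_one] at h2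
      simp [pvALoop, List.findIdx?_cons, hH, h2]
    · have ih' := ih (pref ++ [line])
      simp only [List.length_append, List.length_cons, List.length_nil, Nat.zero_add,
        List.append_assoc, List.singleton_append, Nat.cast_add, Nat.cast_one] at ih'
      cases hF : rest'.findIdx? (fun line => PySem.Str.strip line == "## Table of Contents") with
      | none =>
        rw [hF] at ih'
        simp [pvALoop, List.findIdx?_cons, hH, hF, ih']
      | some k =>
        rw [hF] at ih'
        simp only [pvALoop, List.findIdx?_cons]
        simp [hH, hF, ih', Nat.add_assoc, Nat.add_comm 1 (k+1)]

-- ===== VERDICT (by name: the statement is the Claim_ definition above) =====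
theorem extract_metadata_and_toc_spec : Claim_equal_extract_metadata_and_toc := by
  intro lines _
  unfold Spec_extract_metadata_and_toc extract_metadata_and_toc extract_metadata_and_toc_alt
  have h := phase1 lines []
  simp only [List.length_nil, Int.natCast_zero, List.nil_append] at h
  rw [h]
  cases lines.findIdx? (fun line => PySem.Str.strip line == "## Table of Contents") with
  | none => rfl
  | some k => simp
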